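-- pv_equiv track=rewrite | github.com/tpvt99/cs5234_cache | src/simple_cache_sim/Simulator.py | _get_flat_idx
-- ===== SOURCE A (Python) =====
-- from typing import Optional, Tuple, Any
--
-- def _get_flat_idx(idx: Tuple[int, ...], dimension: Tuple[int, ...]):
--     p = 1
--     idx_flat = 0
--     for i, d in zip(reversed(idx), reversed(dimension)):
--         assert 0 <= i < d, "Index must be at least 0 and less than dimension size"
--         idx_flat += i * p
--         p *= d
--     return idx_flat
-- ===== SOURCE B (Python) =====
-- def _get_flat_idx(idx, dimension):
--     # Different decomposition: trim the longer tuple's unused prefix (the zip of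
--     # the reversals is right-aligned), then recurse front-to-back with Horner's rule.
--     n = min(len(idx), len(dimension))
--     def horner(ii, dd, acc):
--         if not ii:
--             return acc
--         i, d = ii[0], dd[0]
--         assert 0 <= i < d, "Index must be at least 0 and less than dimension size"
--         return horner(ii[1:], dd[1:], acc * d + i)
--     return horner(idx[len(idx) - n:], dimension[len(dimension) - n:], 0)
-- ===== Notes on version B (the rewrite author's own statement) =====
-- stated objective: alternative
-- what changed: Instead of A's single reversed-zip loop carrying a growing place-value multiplier p, B first trims the longer tuple's unused prefix so the lists are aligned, then recurses front-to-back over the two suffixes with Horner's rule acc = acc*d + i (no multiplier state, recursion instead of a fold over a reversed zip).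
import Mathlib
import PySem

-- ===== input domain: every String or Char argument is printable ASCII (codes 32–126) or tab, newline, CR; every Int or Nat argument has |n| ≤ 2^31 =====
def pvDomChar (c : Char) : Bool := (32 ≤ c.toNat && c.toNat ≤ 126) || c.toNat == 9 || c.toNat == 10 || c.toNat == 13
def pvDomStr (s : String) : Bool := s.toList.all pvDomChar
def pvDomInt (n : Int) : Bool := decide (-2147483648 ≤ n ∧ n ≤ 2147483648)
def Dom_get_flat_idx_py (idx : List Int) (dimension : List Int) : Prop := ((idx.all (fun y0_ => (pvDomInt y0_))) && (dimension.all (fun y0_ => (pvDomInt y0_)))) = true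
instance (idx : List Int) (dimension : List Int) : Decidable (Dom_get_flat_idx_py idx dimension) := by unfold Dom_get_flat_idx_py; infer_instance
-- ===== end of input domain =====

-- B trims the longer list's unused prefix and recurses front-to-back with Horner's rule
-- (no place-value multiplier), instead of A's reversed-zip fold; equal wherever A's asserts pass.

-- ===== PORT A =====
def get_flat_idx_py (idx : List Int) (dimension : List Int) : Int :=
  ((idx.reverse.zip dimension.reverse).foldl
    (fun (s : Int × Int) (pd : Int × Int) => (s.1 * pd.2, s.2 + pd.1 * s.1)) (1, 0)).2

-- ===== PORT B =====
-- Source B's inner recursive helper `horner`: front-to-back Horner accumulation.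
def pvHorner : List Int → List Int → Int → Int
  | i :: ii, d :: dd, acc => pvHorner ii dd (acc * d + i)
  | _, _, acc => acc

def get_flat_idx_py_alt (idx : List Int) (dimension : List Int) : Int :=
  let n := min idx.length dimension.length
  pvHorner (idx.drop (idx.length - n)) (dimension.drop (dimension.length - n)) 0

-- ===== PRECONDITION & SPEC =====
-- Pre_ excludes exactly the inputs where A's assert fails (AssertionError): every right-aligned pair must satisfy 0 <= i < d.
def Pre_get_flat_idx_py (idx : List Int) (dimension : List Int) : Prop :=
  ∀ pd ∈ idx.reverse.zip dimension.reverse, 0 ≤ pd.1 ∧ pd.1 < pd.2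
instance (idx : List Int) (dimension : List Int) : Decidable (Pre_get_flat_idx_py idx dimension) := by unfold Pre_get_flat_idx_py; infer_instance
def pvWitness_get_flat_idx_py : List Int × List Int := ([1, 2], [3, 4])

def Spec_get_flat_idx_py (idx : List Int) (dimension : List Int) (out : Int) : Prop := out = get_flat_idx_py_alt idx dimension
instance (idx : List Int) (dimension : List Int) (out : Int) : Decidable (Spec_get_flat_idx_py idx dimension out) := by unfold Spec_get_flat_idx_py; infer_instance

-- ===== CLAIM =====
def Claim_equal_get_flat_idx_py : Prop := ∀ (idx : List Int) (dimension : List Int), Dom_get_flat_idx_py idx dimension → Pre_get_flat_idx_py idx dimension → Spec_get_flat_idx_py idx dimension (get_flat_idx_py idx dimension)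

-- ===== LEMMAS AND PROOFS =====

-- A's fold, started from any (p, f), is f + p * (Horner over the reversed pair list).
theorem pv_fold_horner (l : List (Int × Int)) (p f : Int) :
    (l.foldl (fun (s : Int × Int) (pd : Int × Int) => (s.1 * pd.2, s.2 + pd.1 * s.1)) (p, f)).2
      = f + p * (l.reverse.foldl (fun (acc : Int) (pd : Int × Int) => acc * pd.2 + pd.1) 0) := by
  induction l generalizing p f with
  | nil => simp
  | cons pd t ih =>
      simp only [List.foldl_cons, List.reverse_cons, List.foldl_append, List.foldl_cons,
        List.foldl_nil, ih]
      ring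

-- pvHorner is the Horner fold over the zip of its two lists.
theorem pvHorner_eq_foldl (ii dd : List Int) (acc : Int) :
    pvHorner ii dd acc
      = (ii.zip dd).foldl (fun (acc : Int) (pd : Int × Int) => acc * pd.2 + pd.1) acc := by
  induction ii generalizing dd acc with
  | nil => simp [pvHorner]
  | cons i t ih =>
      cases dd with
      | nil => simp [pvHorner]
      | cons d dd => simp [pvHorner, ih]

-- Equal-length reversal lemma for zip.
theorem pv_zip_reverse (a b : List Int) (h : a.length = b.length) :
    a.reverse.zip b.reverse = (a.zip b).reverse := by
  induction a generalizing b with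
  | nil => cases b <;> simp_all
  | cons x xs ih =>
      cases b with
      | nil => simp_all
      | cons y ys =>
          simp only [List.length_cons, Nat.succ.injEq] at h
          simp only [List.reverse_cons]
          rw [List.zip_append (by simp [h]), ih ys h]
          simp

-- The reversed zip of the reversals is the zip of the right-aligned suffixes.
theorem pv_zip_rev_rev (a b : List Int) :
    (a.reverse.zip b.reverse).reverse
      = (a.drop (a.length - min a.length b.length)).zip
        (b.drop (b.length - min a.length b.length)) := by
  set n := min a.length b.length with hn
  have ha := (List.take_append_drop (a.length - n) a).symm
  have hb := (List.take_append_drop (b.length - n) b).symm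
  have hla : (a.drop (a.length - n)).length = n := by simp [hn]; omega
  have hlb : (b.drop (b.length - n)).length = n := by simp [hn]; omega
  have hone : a.length - n = 0 ∨ b.length - n = 0 := by omega
  conv_lhs => rw [ha, hb]
  rw [List.reverse_append, List.reverse_append,
      List.zip_append (by simp [hla, hlb]),
      pv_zip_reverse _ _ (by omega)]
  have hzero : (a.take (a.length - n)).reverse.zip (b.take (b.length - n)).reverse = [] := by
    rcases hone with h0 | h0 <;> simp [h0]
  simp [hzero]

-- ===== VERDICT =====
theorem get_flat_idx_py_spec : Claim_equal_get_flat_idx_py := by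
  intro idx dimension _ _
  unfold Spec_get_flat_idx_py get_flat_idx_py get_flat_idx_py_alt
  rw [pv_fold_horner, pvHorner_eq_foldl, ← pv_zip_rev_rev]
  ring
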